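-- pv_equiv track=rewrite | github.com/pepsflynn/pepsflynn-nis2-quick-scan | scoring.py | get_nis2_category
-- ===== SOURCE A (Python) =====
-- NIS2_SECTORS = {
--     "energia": {"ateco_prefix": ["05", "06", "07", "08", "09", "19", "35"], "category": "Essenziale", "description": "Energia (elettrica, gas, petrolio)"},
--     "trasporti": {"ateco_prefix": ["49", "50", "51", "52", "53"], "category": "Essenziale", "description": "Trasporti (aereo, ferroviario, marittimo, stradale)"},
--     "sanita": {"ateco_prefix": ["86", "87", "88"], "category": "Essenziale", "description": "Sanità e assistenza"},
--     "acqua": {"ateco_prefix": ["36", "37", "38", "39"], "category": "Essenziale", "description": "Acqua potabile e acque reflue"},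
--     "digitale": {"ateco_prefix": ["61", "62", "63", "58", "59", "60"], "category": "Importante", "description": "Infrastrutture digitali e servizi ICT"},
--     "finanza": {"ateco_prefix": ["64", "65", "66"], "category": "Importante", "description": "Servizi finanziari e bancari"},
--     "pubblica": {"ateco_prefix": ["84"], "category": "Essenziale", "description": "Pubblica Amministrazione"},
--     "manifatturiero": {"ateco_prefix": ["10", "11", "13", "14", "20", "21", "24", "25", "26", "27", "28", "29", "30"], "category": "Importante", "description": "Manifatturiero critico"},
--     "chimico": {"ateco_prefix": ["20", "21", "22"], "category": "Essenziale", "description": "Sostanze chimiche"},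
--     "postale": {"ateco_prefix": ["53.2", "53.20"], "category": "Essenziale", "description": "Servizi postali e corrieri"}
-- }
--
-- def get_nis2_category(ateco_code, employees_str):
--     if not ateco_code or ateco_code == "N/D":
--         return {"category": "N/D", "description": "Impossibile determinare senza ATECO"}
--     category = "Altro"
--     description = "Settore non classificato come essenziale/importante"
--     for sector, info in NIS2_SECTORS.items():
--         for prefix in info["ateco_prefix"]:
--             if ateco_code.startswith(prefix):
--                 category = info["category"]
--                 description = info["description"]
--                 break
--         if category != "Altro":
--             break
--     try:
--         employees = int(''.join(filter(str.isdigit, str(employees_str))))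
--         if category == "Importante" and employees >= 250:
--             category = "Essenziale"
--         elif category == "Altro" and employees >= 50:
--             category = "Importante"
--             description = "PMI in settore non critico ma con numero significativo di dipendenti"
--     except:
--         pass
--     return {"category": category, "description": description}
-- ===== SOURCE B (Python) =====
-- _DEFAULT = ("Altro", "Settore non classificato come essenziale/importante")
--
--
-- def _classify(prefix2):
--     """Arithmetic classification of the two-character ATECO division number.
--
--     Every prefix match in the original sector scan is decided by the first two
--     characters of the code (the longer postal prefixes '53.2'/'53.20' are
--     shadowed by the transport prefix '53'), so the division number alone,
--     tested against closed integer ranges, determines the category.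
--     """
--     if len(prefix2) != 2 or not prefix2.isdigit():
--         return _DEFAULT
--     n = int(prefix2)
--     if n in (5, 6, 7, 8, 9, 19, 35):
--         return ("Essenziale", "Energia (elettrica, gas, petrolio)")
--     if 49 <= n <= 53:
--         return ("Essenziale", "Trasporti (aereo, ferroviario, marittimo, stradale)")
--     if 86 <= n <= 88:
--         return ("Essenziale", "Sanità e assistenza")
--     if 36 <= n <= 39:
--         return ("Essenziale", "Acqua potabile e acque reflue")
--     if 58 <= n <= 63:
--         return ("Importante", "Infrastrutture digitali e servizi ICT")
--     if 64 <= n <= 66: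
--         return ("Importante", "Servizi finanziari e bancari")
--     if n == 84:
--         return ("Essenziale", "Pubblica Amministrazione")
--     if n in (10, 11, 13, 14) or 20 <= n <= 21 or 24 <= n <= 30:
--         return ("Importante", "Manifatturiero critico")
--     if n == 22:
--         return ("Essenziale", "Sostanze chimiche")
--     return _DEFAULT
--
--
-- def get_nis2_category(ateco_code, employees_str):
--     if not ateco_code or ateco_code == "N/D":
--         return {"category": "N/D", "description": "Impossibile determinare senza ATECO"}
--     category, description = _classify(ateco_code[:2])
--     digits = ''.join(c for c in str(employees_str) if c.isdigit())
--     if digits: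
--         n = int(digits)
--         if category == "Importante" and n >= 250:
--             category = "Essenziale"
--         elif category == "Altro" and n >= 50:
--             category = "Importante"
--             description = "PMI in settore non critico ma con numero significativo di dipendenti"
--     return {"category": category, "description": description}
-- ===== Notes on version B (the rewrite author's own statement) =====
-- stated objective: alternative
-- what changed: Replaces the nested sector/prefix startswith scan over 47 string prefixes by an arithmetic classification: the two-character division prefix is parsed as an integer once and categorised by closed integer range/membership tests (the longer postal prefixes are provably shadowed by '53'); the employee-count adjustment keeps its logic but is guarded by an explicit empty-digits check instead of try/except.
import Mathlib
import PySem

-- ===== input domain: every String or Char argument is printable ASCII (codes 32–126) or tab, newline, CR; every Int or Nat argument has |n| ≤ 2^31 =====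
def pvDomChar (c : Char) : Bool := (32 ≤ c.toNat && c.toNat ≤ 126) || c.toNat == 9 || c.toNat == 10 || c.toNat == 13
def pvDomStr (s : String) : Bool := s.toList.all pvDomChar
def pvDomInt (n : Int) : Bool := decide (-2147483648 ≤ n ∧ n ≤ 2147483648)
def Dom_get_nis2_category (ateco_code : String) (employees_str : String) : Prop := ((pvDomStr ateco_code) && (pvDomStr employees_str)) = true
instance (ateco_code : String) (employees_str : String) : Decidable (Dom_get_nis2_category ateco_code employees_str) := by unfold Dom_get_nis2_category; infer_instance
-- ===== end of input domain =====

-- B replaces A's nested sector/prefix scan by an arithmetic classification: the two-character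
-- division prefix is parsed as an integer and categorised by closed integer range tests.

-- ===== PORT A =====
-- NIS2_SECTORS.items(): (ateco_prefix, category, description) in dict insertion order
def nis2Sectors : List (List String × String × String) := [
  (["05", "06", "07", "08", "09", "19", "35"], "Essenziale", "Energia (elettrica, gas, petrolio)"),
  (["49", "50", "51", "52", "53"], "Essenziale", "Trasporti (aereo, ferroviario, marittimo, stradale)"),
  (["86", "87", "88"], "Essenziale", "Sanità e assistenza"),
  (["36", "37", "38", "39"], "Essenziale", "Acqua potabile e acque reflue"),
  (["61", "62", "63", "58", "59", "60"], "Importante", "Infrastrutture digitali e servizi ICT"),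
  (["64", "65", "66"], "Importante", "Servizi finanziari e bancari"),
  (["84"], "Essenziale", "Pubblica Amministrazione"),
  (["10", "11", "13", "14", "20", "21", "24", "25", "26", "27", "28", "29", "30"], "Importante", "Manifatturiero critico"),
  (["20", "21", "22"], "Essenziale", "Sostanze chimiche"),
  (["53.2", "53.20"], "Essenziale", "Servizi postali e corrieri")]

-- A's outer loop with its two breaks: the inner loop sets (category, description) at the first
-- matching prefix (any prefix of the sector sets the same pair), the outer loop stops as soon
-- as category ≠ "Altro".
def nis2ScanA (code : String) : List (List String × String × String) → (String × String) → (String × String)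
  | [], st => st
  | (pfxs, cat, desc) :: rest, st =>
    let st' := if pfxs.any (fun p => PySem.Str.startswith code p) then (cat, desc) else st
    if st'.1 == "Altro" then nis2ScanA code rest st' else st'

def get_nis2_category (ateco_code : String) (employees_str : String) : List (String × String) :=
  if ateco_code == "" || ateco_code == "N/D" then
    [("category", "N/D"), ("description", "Impossibile determinare senza ATECO")]
  else
    let st := nis2ScanA ateco_code nis2Sectors
      ("Altro", "Settore non classificato come essenziale/importante")
    -- try: employees = int(''.join(filter(str.isdigit, str(employees_str)))) ; except: pass
    let st2 :=
      match PySem.Int.ofChars? (employees_str.toList.filter PySem.Chars.isdigit) with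
      | none => st
      | some employees =>
        if st.1 == "Importante" && decide (250 ≤ employees) then ("Essenziale", st.2)
        else if st.1 == "Altro" && decide (50 ≤ employees) then
          ("Importante", "PMI in settore non critico ma con numero significativo di dipendenti")
        else st
    [("category", st2.1), ("description", st2.2)]

-- ===== PORT B =====
-- Source B's _classify: arithmetic classification of the two-character division number
def nis2Classify (prefix2 : String) : String × String :=
  if PySem.Str.len prefix2 != 2 || !(PySem.Str.strIsdigit prefix2) then
    ("Altro", "Settore non classificato come essenziale/importante")
  else
    -- int(prefix2): two ASCII digits after the isdigit check, so int() never fails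
    let n : Int := (PySem.Int.ofChars? prefix2.toList).getD 0
    if n == 5 || n == 6 || n == 7 || n == 8 || n == 9 || n == 19 || n == 35 then
      ("Essenziale", "Energia (elettrica, gas, petrolio)")
    else if decide (49 ≤ n) && decide (n ≤ 53) then
      ("Essenziale", "Trasporti (aereo, ferroviario, marittimo, stradale)")
    else if decide (86 ≤ n) && decide (n ≤ 88) then
      ("Essenziale", "Sanità e assistenza")
    else if decide (36 ≤ n) && decide (n ≤ 39) then
      ("Essenziale", "Acqua potabile e acque reflue")
    else if decide (58 ≤ n) && decide (n ≤ 63) then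
      ("Importante", "Infrastrutture digitali e servizi ICT")
    else if decide (64 ≤ n) && decide (n ≤ 66) then
      ("Importante", "Servizi finanziari e bancari")
    else if n == 84 then
      ("Essenziale", "Pubblica Amministrazione")
    else if n == 10 || n == 11 || n == 13 || n == 14
        || (decide (20 ≤ n) && decide (n ≤ 21)) || (decide (24 ≤ n) && decide (n ≤ 30)) then
      ("Importante", "Manifatturiero critico")
    else if n == 22 then
      ("Essenziale", "Sostanze chimiche")
    else
      ("Altro", "Settore non classificato come essenziale/importante")

def get_nis2_category_alt (ateco_code : String) (employees_str : String) : List (String × String) :=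
  if ateco_code == "" || ateco_code == "N/D" then
    [("category", "N/D"), ("description", "Impossibile determinare senza ATECO")]
  else
    let cd := nis2Classify (PySem.Str.slice ateco_code none (some 2))
    let digits := employees_str.toList.filter PySem.Chars.isdigit
    let st :=
      if digits.isEmpty then cd
      else
        -- int(digits): a nonempty all-digit string, int() never fails (the none arm is unreachable)
        match PySem.Int.ofChars? digits with
        | none => cd
        | some n =>
          if cd.1 == "Importante" && decide (250 ≤ n) then ("Essenziale", cd.2)
          else if cd.1 == "Altro" && decide (50 ≤ n) then
            ("Importante", "PMI in settore non critico ma con numero significativo di dipendenti")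
          else cd
    [("category", st.1), ("description", st.2)]

-- ===== PRECONDITION & SPEC =====
def Spec_get_nis2_category (ateco_code : String) (employees_str : String) (out : List (String × String)) : Prop := out = get_nis2_category_alt ateco_code employees_str
instance (ateco_code : String) (employees_str : String) (out : List (String × String)) : Decidable (Spec_get_nis2_category ateco_code employees_str out) := by unfold Spec_get_nis2_category; infer_instance

-- ===== CLAIM (what is proved, stated in full; the proofs are below) =====
def Claim_equal_get_nis2_category : Prop := ∀ (ateco_code : String) (employees_str : String), Dom_get_nis2_category ateco_code employees_str → Spec_get_nis2_category ateco_code employees_str (get_nis2_category ateco_code employees_str)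

-- ===== LEMMAS AND PROOFS =====

-- Proof-side prefix table: first occurrence of each two-character prefix in scan order,
-- the common value both the scan and the arithmetic classification are proved equal to.
def nis2TableItems : List (String × String × String) := [
  ("05", ("Essenziale", "Energia (elettrica, gas, petrolio)")),
  ("06", ("Essenziale", "Energia (elettrica, gas, petrolio)")),
  ("07", ("Essenziale", "Energia (elettrica, gas, petrolio)")),
  ("08", ("Essenziale", "Energia (elettrica, gas, petrolio)")),
  ("09", ("Essenziale", "Energia (elettrica, gas, petrolio)")),
  ("19", ("Essenziale", "Energia (elettrica, gas, petrolio)")),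
  ("35", ("Essenziale", "Energia (elettrica, gas, petrolio)")),
  ("49", ("Essenziale", "Trasporti (aereo, ferroviario, marittimo, stradale)")),
  ("50", ("Essenziale", "Trasporti (aereo, ferroviario, marittimo, stradale)")),
  ("51", ("Essenziale", "Trasporti (aereo, ferroviario, marittimo, stradale)")),
  ("52", ("Essenziale", "Trasporti (aereo, ferroviario, marittimo, stradale)")),
  ("53", ("Essenziale", "Trasporti (aereo, ferroviario, marittimo, stradale)")),
  ("86", ("Essenziale", "Sanità e assistenza")),
  ("87", ("Essenziale", "Sanità e assistenza")),
  ("88", ("Essenziale", "Sanità e assistenza")),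
  ("36", ("Essenziale", "Acqua potabile e acque reflue")),
  ("37", ("Essenziale", "Acqua potabile e acque reflue")),
  ("38", ("Essenziale", "Acqua potabile e acque reflue")),
  ("39", ("Essenziale", "Acqua potabile e acque reflue")),
  ("61", ("Importante", "Infrastrutture digitali e servizi ICT")),
  ("62", ("Importante", "Infrastrutture digitali e servizi ICT")),
  ("63", ("Importante", "Infrastrutture digitali e servizi ICT")),
  ("58", ("Importante", "Infrastrutture digitali e servizi ICT")),
  ("59", ("Importante", "Infrastrutture digitali e servizi ICT")),
  ("60", ("Importante", "Infrastrutture digitali e servizi ICT")),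
  ("64", ("Importante", "Servizi finanziari e bancari")),
  ("65", ("Importante", "Servizi finanziari e bancari")),
  ("66", ("Importante", "Servizi finanziari e bancari")),
  ("84", ("Essenziale", "Pubblica Amministrazione")),
  ("10", ("Importante", "Manifatturiero critico")),
  ("11", ("Importante", "Manifatturiero critico")),
  ("13", ("Importante", "Manifatturiero critico")),
  ("14", ("Importante", "Manifatturiero critico")),
  ("20", ("Importante", "Manifatturiero critico")),
  ("21", ("Importante", "Manifatturiero critico")),
  ("24", ("Importante", "Manifatturiero critico")),
  ("25", ("Importante", "Manifatturiero critico")),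
  ("26", ("Importante", "Manifatturiero critico")),
  ("27", ("Importante", "Manifatturiero critico")),
  ("28", ("Importante", "Manifatturiero critico")),
  ("29", ("Importante", "Manifatturiero critico")),
  ("30", ("Importante", "Manifatturiero critico")),
  ("22", ("Essenziale", "Sostanze chimiche"))]

def nis2Lookup (l : List Char) : String × String :=
  ((nis2TableItems.find? (fun kv => kv.1 == String.ofList l)).map (fun kv => kv.2)).getD
    ("Altro", "Settore non classificato come essenziale/importante")

lemma scanA_nil (code : String) (st : String × String) : nis2ScanA code [] st = st := rfl

lemma scanA_cons (code : String) (pfxs : List String) (cat desc : String)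
    (rest : List (List String × String × String)) (d0 : String)
    (h : (cat == "Altro") = false) :
    nis2ScanA code ((pfxs, cat, desc) :: rest) ("Altro", d0)
      = if pfxs.any (fun p => PySem.Str.startswith code p) then (cat, desc)
        else nis2ScanA code rest ("Altro", d0) := by
  cases hc : pfxs.any (fun p => PySem.Str.startswith code p) <;>
    simp only [nis2ScanA, hc] <;> simp [h]

lemma sw_eq (code p : String) (h : p.toList.length = 2) :
    PySem.Str.startswith code p = (p == String.ofList (code.toList.take 2)) := by
  rw [Bool.eq_iff_iff]
  rw [PySem.Str.startswith_eq, PySem.Chars.startswith_iff, beq_iff_eq, String.ext_iff,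
    String.toList_ofList, List.prefix_iff_eq_take, h]

lemma sw53 (code p : String) (hp : "53".toList <+: p.toList)
    (h : PySem.Str.startswith code "53" = false) :
    PySem.Str.startswith code p = false := by
  cases hsp : PySem.Str.startswith code p with
  | false => rfl
  | true =>
    rw [PySem.Str.startswith_eq, PySem.Chars.startswith_iff] at hsp
    rw [PySem.Str.startswith_eq] at h
    have hc := (PySem.Chars.startswith_iff _ _).mpr (hp.trans hsp)
    rw [h] at hc
    cases hc

set_option maxRecDepth 8192 in
lemma nis2_scan_eq_lookup (code : String) :
    nis2ScanA code nis2Sectors ("Altro", "Settore non classificato come essenziale/importante")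
      = nis2Lookup (code.toList.take 2) := by
  simp only [nis2Sectors, nis2Lookup, nis2TableItems, scanA_cons, String.reduceBEq, List.any_cons, List.any_nil,
    scanA_nil, sw_eq code "05" (by decide), sw_eq code "06" (by decide), sw_eq code "07" (by decide), sw_eq code "08" (by decide), sw_eq code "09" (by decide), sw_eq code "19" (by decide), sw_eq code "35" (by decide), sw_eq code "49" (by decide), sw_eq code "50" (by decide), sw_eq code "51" (by decide), sw_eq code "52" (by decide), sw_eq code "53" (by decide), sw_eq code "86" (by decide), sw_eq code "87" (by decide), sw_eq code "88" (by decide), sw_eq code "36" (by decide), sw_eq code "37" (by decide), sw_eq code "38" (by decide), sw_eq code "39" (by decide), sw_eq code "61" (by decide), sw_eq code "62" (by decide), sw_eq code "63" (by decide), sw_eq code "58" (by decide), sw_eq code "59" (by decide), sw_eq code "60" (by decide), sw_eq code "64" (by decide), sw_eq code "65" (by decide), sw_eq code "66" (by decide), sw_eq code "84" (by decide), sw_eq code "10" (by decide), sw_eq code "11" (by decide), sw_eq code "13" (by decide), sw_eq code "14" (by decide), sw_eq code "20" (by decide), sw_eq code "21" (by decide), sw_eq code "24" (by decide), sw_eq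 code "25" (by decide), sw_eq code "26" (by decide), sw_eq code "27" (by decide), sw_eq code "28" (by decide), sw_eq code "29" (by decide), sw_eq code "30" (by decide), sw_eq code "22" (by decide)]
  by_cases h0 : ("05" : String) = String.ofList (List.take 2 code.toList)
  · simp [*, List.find?, beq_eq_decide]
  by_cases h1 : ("06" : String) = String.ofList (List.take 2 code.toList)
  · simp [*, List.find?, beq_eq_decide]
  by_cases h2 : ("07" : String) = String.ofList (List.take 2 code.toList)
  · simp [*, List.find?, beq_eq_decide]
  by_cases h3 : ("08" : String) = String.ofList (List.take 2 code.toList)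
  · simp [*, List.find?, beq_eq_decide]
  by_cases h4 : ("09" : String) = String.ofList (List.take 2 code.toList)
  · simp [*, List.find?, beq_eq_decide]
  by_cases h5 : ("19" : String) = String.ofList (List.take 2 code.toList)
  · simp [*, List.find?, beq_eq_decide]
  by_cases h6 : ("35" : String) = String.ofList (List.take 2 code.toList)
  · simp [*, List.find?, beq_eq_decide]
  by_cases h7 : ("49" : String) = String.ofList (List.take 2 code.toList)
  · simp [*, List.find?, beq_eq_decide]
  by_cases h8 : ("50" : String) = String.ofList (List.take 2 code.toList)
  · simp [*, List.find?, beq_eq_decide]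
  by_cases h9 : ("51" : String) = String.ofList (List.take 2 code.toList)
  · simp [*, List.find?, beq_eq_decide]
  by_cases h10 : ("52" : String) = String.ofList (List.take 2 code.toList)
  · simp [*, List.find?, beq_eq_decide]
  by_cases h11 : ("53" : String) = String.ofList (List.take 2 code.toList)
  · simp [*, List.find?, beq_eq_decide]
  by_cases h12 : ("86" : String) = String.ofList (List.take 2 code.toList)
  · simp [*, List.find?, beq_eq_decide]
  by_cases h13 : ("87" : String) = String.ofList (List.take 2 code.toList)
  · simp [*, List.find?, beq_eq_decide]
  by_cases h14 : ("88" : String) = String.ofList (List.take 2 code.toList)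
  · simp [*, List.find?, beq_eq_decide]
  by_cases h15 : ("36" : String) = String.ofList (List.take 2 code.toList)
  · simp [*, List.find?, beq_eq_decide]
  by_cases h16 : ("37" : String) = String.ofList (List.take 2 code.toList)
  · simp [*, List.find?, beq_eq_decide]
  by_cases h17 : ("38" : String) = String.ofList (List.take 2 code.toList)
  · simp [*, List.find?, beq_eq_decide]
  by_cases h18 : ("39" : String) = String.ofList (List.take 2 code.toList)
  · simp [*, List.find?, beq_eq_decide]
  by_cases h19 : ("61" : String) = String.ofList (List.take 2 code.toList)
  · simp [*, List.find?, beq_eq_decide]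
  by_cases h20 : ("62" : String) = String.ofList (List.take 2 code.toList)
  · simp [*, List.find?, beq_eq_decide]
  by_cases h21 : ("63" : String) = String.ofList (List.take 2 code.toList)
  · simp [*, List.find?, beq_eq_decide]
  by_cases h22 : ("58" : String) = String.ofList (List.take 2 code.toList)
  · simp [*, List.find?, beq_eq_decide]
  by_cases h23 : ("59" : String) = String.ofList (List.take 2 code.toList)
  · simp [*, List.find?, beq_eq_decide]
  by_cases h24 : ("60" : String) = String.ofList (List.take 2 code.toList)
  · simp [*, List.find?, beq_eq_decide]
  by_cases h25 : ("64" : String) = String.ofList (List.take 2 code.toList)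
  · simp [*, List.find?, beq_eq_decide]
  by_cases h26 : ("65" : String) = String.ofList (List.take 2 code.toList)
  · simp [*, List.find?, beq_eq_decide]
  by_cases h27 : ("66" : String) = String.ofList (List.take 2 code.toList)
  · simp [*, List.find?, beq_eq_decide]
  by_cases h28 : ("84" : String) = String.ofList (List.take 2 code.toList)
  · simp [*, List.find?, beq_eq_decide]
  by_cases h29 : ("10" : String) = String.ofList (List.take 2 code.toList)
  · simp [*, List.find?, beq_eq_decide]
  by_cases h30 : ("11" : String) = String.ofList (List.take 2 code.toList)
  · simp [*, List.find?, beq_eq_decide]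
  by_cases h31 : ("13" : String) = String.ofList (List.take 2 code.toList)
  · simp [*, List.find?, beq_eq_decide]
  by_cases h32 : ("14" : String) = String.ofList (List.take 2 code.toList)
  · simp [*, List.find?, beq_eq_decide]
  by_cases h33 : ("20" : String) = String.ofList (List.take 2 code.toList)
  · simp [*, List.find?, beq_eq_decide]
  by_cases h34 : ("21" : String) = String.ofList (List.take 2 code.toList)
  · simp [*, List.find?, beq_eq_decide]
  by_cases h35 : ("24" : String) = String.ofList (List.take 2 code.toList)
  · simp [*, List.find?, beq_eq_decide]
  by_cases h36 : ("25" : String) = String.ofList (List.take 2 code.toList)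
  · simp [*, List.find?, beq_eq_decide]
  by_cases h37 : ("26" : String) = String.ofList (List.take 2 code.toList)
  · simp [*, List.find?, beq_eq_decide]
  by_cases h38 : ("27" : String) = String.ofList (List.take 2 code.toList)
  · simp [*, List.find?, beq_eq_decide]
  by_cases h39 : ("28" : String) = String.ofList (List.take 2 code.toList)
  · simp [*, List.find?, beq_eq_decide]
  by_cases h40 : ("29" : String) = String.ofList (List.take 2 code.toList)
  · simp [*, List.find?, beq_eq_decide]
  by_cases h41 : ("30" : String) = String.ofList (List.take 2 code.toList)
  · simp [*, List.find?, beq_eq_decide]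
  by_cases h42 : ("22" : String) = String.ofList (List.take 2 code.toList)
  · simp [*, List.find?, beq_eq_decide]
  have hi53 : PySem.Str.startswith code "53" = false := by
    rw [sw_eq code "53" (by decide)]
    simpa using h11
  have hs1 : PySem.Chars.startswith code.toList ['5', '3', '.', '2'] = false := by
    simpa using sw53 code "53.2" (by decide) hi53
  have hs2 : PySem.Chars.startswith code.toList ['5', '3', '.', '2', '0'] = false := by
    simpa using sw53 code "53.20" (by decide) hi53
  simp [*, List.find?, beq_eq_decide, PySem.Str.startswith_eq]

-- every table key has exactly two characters, both digits
lemma nis2_keys_shape : ∀ kv ∈ nis2TableItems,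
    kv.1.toList.length = 2 ∧ kv.1.toList.all PySem.Chars.isdigit = true := by decide

-- a digit char is Char.ofNat (48 + d) for some d < 10
lemma digit_char_shape (c : Char) (h : PySem.Chars.isdigit c = true) :
    ∃ d : Fin 10, c = Char.ofNat (48 + d.val) := by
  rw [PySem.Chars.isdigit, Bool.and_eq_true] at h
  obtain ⟨h1, h2⟩ := h
  rw [decide_eq_true_eq, Char.le_def, UInt32.le_iff_toNat_le] at h1 h2
  have hb1 : 48 ≤ c.toNat := h1
  have hb2 : c.toNat ≤ 57 := h2
  refine ⟨⟨c.toNat - 48, by omega⟩, ?_⟩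
  have he : 48 + (c.toNat - 48) = c.toNat := by omega
  rw [he, Char.ofNat_toNat]

set_option maxRecDepth 8192 in
lemma nis2_lookup_eq_classify_digits : ∀ d1 d2 : Fin 10,
    nis2Lookup [Char.ofNat (48 + d1.val), Char.ofNat (48 + d2.val)]
      = nis2Classify (String.ofList [Char.ofNat (48 + d1.val), Char.ofNat (48 + d2.val)]) := by
  decide

lemma nis2_lookup_eq_classify (l : List Char) (hl : l.length ≤ 2) :
    nis2Lookup l = nis2Classify (String.ofList l) := by
  match l with
  | [] => decide
  | [c] =>
    have hfind : nis2TableItems.find? (fun kv => kv.1 == String.ofList [c]) = none := by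
      rw [List.find?_eq_none]
      intro kv hkv hb
      have hk := (nis2_keys_shape kv hkv).1
      have := congrArg (fun s => s.toList.length) (eq_of_beq hb)
      simp [hk] at this
    simp [nis2Lookup, hfind, nis2Classify, PySem.Str.len]
  | c1 :: c2 :: rest =>
    have hr : rest = [] := by
      simp only [List.length_cons] at hl
      exact List.eq_nil_of_length_eq_zero (by omega)
    subst hr
    by_cases hd : (PySem.Chars.isdigit c1 && PySem.Chars.isdigit c2) = true
    · rw [Bool.and_eq_true] at hd
      obtain ⟨hd1, hd2⟩ := hd
      obtain ⟨d1, rfl⟩ := digit_char_shape c1 hd1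
      obtain ⟨d2, rfl⟩ := digit_char_shape c2 hd2
      exact nis2_lookup_eq_classify_digits d1 d2
    · have hfind : nis2TableItems.find? (fun kv => kv.1 == String.ofList [c1, c2]) = none := by
        rw [List.find?_eq_none]
        intro kv hkv hb
        obtain ⟨hk2, hkd⟩ := nis2_keys_shape kv hkv
        have heq : kv.1.toList = [c1, c2] := by
          have := congrArg String.toList (eq_of_beq hb)
          simpa using this
        rw [heq] at hkd
        simp only [List.all_cons, List.all_nil, Bool.and_true] at hkd
        exact hd hkd
      have hsd : PySem.Chars.strIsdigit [c1, c2] = false := by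
        simp only [PySem.Chars.strIsdigit, List.isEmpty_cons, Bool.not_false, Bool.true_and,
          List.all_cons, List.all_nil, Bool.and_true]
        exact Bool.eq_false_iff.mpr hd
      simp [nis2Lookup, hfind, nis2Classify, hsd]

-- ===== VERDICT (by name: the statement is the Claim_ definition above) =====
theorem get_nis2_category_spec : Claim_equal_get_nis2_category := by
  intro code emp _
  unfold Spec_get_nis2_category get_nis2_category get_nis2_category_alt
  by_cases hg : (code == "" || code == "N/D") = true
  · simp [hg]
  · simp only [hg, if_false, Bool.false_eq_true]
    have hK : PySem.Str.slice code none (some 2) = String.ofList (code.toList.take 2) := by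
      simp only [PySem.Str.slice, PySem.Chars.slice_eq_listSlice]
      congr 1
      simpa using PySem.List.slice_to (xs := code.toList) (b := 2) (by norm_num)
    rw [nis2_scan_eq_lookup, hK,
      nis2_lookup_eq_classify _ (by simp)]
    by_cases hd : (emp.toList.filter PySem.Chars.isdigit) = []
    · simp [hd, show PySem.Int.ofChars? ([] : List Char) = none from by decide]
    · simp [List.isEmpty_iff, hd]
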